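-- pv_equiv track=rewrite | github.com/Ryanguy253/AdventOfCode2024 | day5.py | findLastOccuranceIndex
-- ===== SOURCE A (Python) =====
-- def findLastOccuranceIndex(prerequisite_pages,page_sequence):
--     max_index = -1
--
--     for prerequisite_page in prerequisite_pages:
--         if prerequisite_page in page_sequence:
--             current_index = page_sequence.index(prerequisite_page)
--             if current_index > max_index:
--                 max_index = current_index
--
--     return max_index
-- ===== SOURCE B (Python) =====
-- def findLastOccuranceIndex(prerequisite_pages, page_sequence):
--     prereq = set(prerequisite_pages)
--     max_index = -1
--     seen = set()
--     for i, page in enumerate(page_sequence):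
--         if page in prereq and page not in seen:
--             seen.add(page)
--             max_index = i
--     return max_index
-- ===== Notes on version B (the rewrite author's own statement) =====
-- stated objective: faster
-- what changed: Instead of scanning page_sequence once per prerequisite (membership test plus .index), B builds a prerequisite set and makes a single pass over enumerate(page_sequence), recording i for each first occurrence of a prerequisite page; ascending indices make the last such update the maximum first-occurrence index.
import Mathlib
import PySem

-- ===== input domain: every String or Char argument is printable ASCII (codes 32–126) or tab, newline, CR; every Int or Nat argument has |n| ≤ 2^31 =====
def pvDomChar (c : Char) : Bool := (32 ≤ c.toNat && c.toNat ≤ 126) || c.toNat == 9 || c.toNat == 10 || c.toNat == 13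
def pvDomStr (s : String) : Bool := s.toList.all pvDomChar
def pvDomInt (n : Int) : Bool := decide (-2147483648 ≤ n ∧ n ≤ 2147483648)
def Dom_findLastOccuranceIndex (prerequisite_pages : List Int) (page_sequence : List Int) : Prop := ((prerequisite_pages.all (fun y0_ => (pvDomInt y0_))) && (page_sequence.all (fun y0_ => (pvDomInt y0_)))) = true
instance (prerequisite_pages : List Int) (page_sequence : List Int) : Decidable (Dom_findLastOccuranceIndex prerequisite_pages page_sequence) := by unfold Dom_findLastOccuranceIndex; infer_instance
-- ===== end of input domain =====

-- B replaces A's per-prerequisite scans of page_sequence by one set-guarded pass over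
-- enumerate(page_sequence); measured faster (asymptotically fewer scans), same return value.


-- ===== PORT A =====
-- 'prerequisite_page in page_sequence' + '.index' ported together via index? (none = not in).
def findLastOccuranceIndex (prerequisite_pages : List Int) (page_sequence : List Int) : Int :=
  prerequisite_pages.foldl (fun max_index prerequisite_page =>
    match PySem.List.index? page_sequence prerequisite_page with
    | some current_index =>
        if (current_index : Int) > max_index then (current_index : Int) else max_index
    | none => max_index) (-1)

-- ===== PORT B =====
def findLastOccuranceIndex_alt (prerequisite_pages : List Int) (page_sequence : List Int) : Int :=
  let prereq : PySem.Set Int := PySem.Set.ofList prerequisite_pages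
  let st := (PySem.List.enumerate page_sequence).foldl
    (fun (st : Int × PySem.Set Int) ip =>
      if PySem.Set.contains prereq ip.2 && !(PySem.Set.contains st.2 ip.2)
      then (ip.1, PySem.Set.add st.2 ip.2)
      else st) (-1, PySem.Set.empty)
  st.1

-- ===== PRECONDITION & SPEC =====
def Spec_findLastOccuranceIndex (prerequisite_pages : List Int) (page_sequence : List Int) (out : Int) : Prop := out = findLastOccuranceIndex_alt prerequisite_pages page_sequence
instance (prerequisite_pages : List Int) (page_sequence : List Int) (out : Int) : Decidable (Spec_findLastOccuranceIndex prerequisite_pages page_sequence out) := by unfold Spec_findLastOccuranceIndex; infer_instance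

-- ===== CLAIM (what is proved, stated in full; the proofs are below) =====
def Claim_equal_findLastOccuranceIndex : Prop := ∀ (prerequisite_pages : List Int) (page_sequence : List Int), Dom_findLastOccuranceIndex prerequisite_pages page_sequence → Spec_findLastOccuranceIndex prerequisite_pages page_sequence (findLastOccuranceIndex prerequisite_pages page_sequence)

-- ===== LEMMAS AND PROOFS =====

-- A's loop body as a named step function.
def pvStepA (sq : List Int) (acc : Int) (p : Int) : Int :=
  match PySem.List.index? sq p with
  | some current_index =>
      if (current_index : Int) > acc then (current_index : Int) else acc
  | none => acc

lemma findLastOccuranceIndex_eq_fold (pr sq : List Int) :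
    findLastOccuranceIndex pr sq = pr.foldl (pvStepA sq) (-1) := rfl

-- Once the accumulator is at least every possible index, A's fold is constant.
lemma foldA_absorb (sq : List Int) : ∀ (pr : List Int) (acc : Int),
    ((sq.length : Int) ≤ acc + 1) → pr.foldl (pvStepA sq) acc = acc := by
  intro pr
  induction pr with
  | nil => intro acc _; rfl
  | cons p pr ih =>
    intro acc h
    have hstep : pvStepA sq acc p = acc := by
      unfold pvStepA
      cases hidx : PySem.List.index? sq p with
      | none => rfl
      | some k =>
        obtain ⟨hk, -, -⟩ := PySem.List.getElem_of_index?_eq_some hidx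
        have : (k : Int) < sq.length := by exact_mod_cast hk
        simp only []
        rw [if_neg (by omega)]
    simp only [List.foldl_cons, hstep]
    exact ih acc h

-- A's step preserves strict boundedness by the length.
lemma stepA_lt (sq : List Int) (acc p : Int) (h : acc < (sq.length : Int)) :
    pvStepA sq acc p < (sq.length : Int) := by
  unfold pvStepA
  cases hidx : PySem.List.index? sq p with
  | none => exact h
  | some k =>
    obtain ⟨hk, -, -⟩ := PySem.List.getElem_of_index?_eq_some hidx
    have : (k : Int) < sq.length := by exact_mod_cast hk
    simp only []
    split <;> omega

-- Appending a fresh element x that occurs in pr drives A's fold to t.length.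
lemma foldA_append_new (t : List Int) (x : Int) (hx : x ∉ t) :
    ∀ (pr : List Int) (acc : Int), acc < (t.length : Int) → x ∈ pr →
    pr.foldl (pvStepA (t ++ [x])) acc = (t.length : Int) := by
  intro pr
  induction pr with
  | nil => intro acc _ h; cases h
  | cons p pr ih =>
    intro acc hacc hmem
    by_cases hpx : p = x
    · subst hpx
      have hidx : PySem.List.index? (t ++ [p]) p = some t.length :=
        PySem.List.index?_append_singleton_self _ _ hx
      have hstep : pvStepA (t ++ [p]) acc p = (t.length : Int) := by
        unfold pvStepA; rw [hidx]; simp only []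
        rw [if_pos (by omega)]
      simp only [List.foldl_cons, hstep]
      exact foldA_absorb (t ++ [p]) pr (t.length : Int)
        (by simp)
    · have hmem' : x ∈ pr := by
        rcases List.mem_cons.mp hmem with h | h
        · exact absurd h.symm hpx
        · exact h
      have hstep : pvStepA (t ++ [x]) acc p = pvStepA t acc p := by
        unfold pvStepA
        by_cases hpt : p ∈ t
        · rw [PySem.List.index?_append_of_mem [x] hpt]
        · have h1 : PySem.List.index? (t ++ [x]) p = none := by
            rw [PySem.List.index?_eq_none_iff]
            simp [hpt, hpx]
          have h2 : PySem.List.index? t p = none := by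
            rw [PySem.List.index?_eq_none_iff]; exact hpt
          rw [h1, h2]
      simp only [List.foldl_cons, hstep]
      exact ih (pvStepA t acc p) (stepA_lt t acc p hacc) hmem'

-- Appending x changes nothing for A when x is already in t or occurs in no prerequisite.
lemma foldA_append_old (t : List Int) (x : Int) :
    ∀ (pr : List Int) (acc : Int), (x ∈ t ∨ x ∉ pr) →
    pr.foldl (pvStepA (t ++ [x])) acc = pr.foldl (pvStepA t) acc := by
  intro pr
  induction pr with
  | nil => intro acc _; rfl
  | cons p pr ih =>
    intro acc hx
    have hstep : pvStepA (t ++ [x]) acc p = pvStepA t acc p := by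
      unfold pvStepA
      by_cases hpt : p ∈ t
      · rw [PySem.List.index?_append_of_mem [x] hpt]
      · have hpx : p ≠ x := by
          rcases hx with h | h
          · intro he; exact hpt (he ▸ h)
          · intro he; exact h (he ▸ List.mem_cons_self ..)
        have h1 : PySem.List.index? (t ++ [x]) p = none := by
          rw [PySem.List.index?_eq_none_iff]
          simp [hpt, hpx]
        have h2 : PySem.List.index? t p = none := by
          rw [PySem.List.index?_eq_none_iff]; exact hpt
        rw [h1, h2]
    have hx' : x ∈ t ∨ x ∉ pr := by
      rcases hx with h | h
      · exact Or.inl h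
      · exact Or.inr (fun hm => h (List.mem_cons_of_mem _ hm))
    simp only [List.foldl_cons, hstep]
    exact ih (pvStepA t acc p) hx'

-- B's loop body as a named step function.
def pvStepB (prereq : PySem.Set Int) (st : Int × PySem.Set Int) (ip : Int × Int) : Int × PySem.Set Int :=
  if PySem.Set.contains prereq ip.2 && !(PySem.Set.contains st.2 ip.2)
  then (ip.1, PySem.Set.add st.2 ip.2)
  else st

lemma mem_ofList' {l : List Int} {x : Int} :
    x ∈ PySem.Set.ofList l ↔ x ∈ l := by
  simp [← PySem.List.dedup_eq_ofList, PySem.List.mem_dedup]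

lemma contains_iff {s : PySem.Set Int} {x : Int} :
    PySem.Set.contains s x = true ↔ x ∈ s := by
  simp [PySem.Set.contains]

-- Main invariant: B's fold over enumerate sq computes A's value on sq, and its 'seen'
-- set holds exactly the sequence elements that are prerequisites.
lemma foldB_inv (pr : List Int) (sq : List Int) :
    ∃ seen : PySem.Set Int,
      (PySem.List.enumerate sq).foldl (pvStepB (PySem.Set.ofList pr)) (-1, PySem.Set.empty)
        = (findLastOccuranceIndex pr sq, seen)
      ∧ ∀ y : Int, y ∈ seen ↔ (y ∈ sq ∧ y ∈ pr) := by
  induction sq using List.reverseRecOn with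
  | nil =>
    refine ⟨PySem.Set.empty, ?_, ?_⟩
    · have : findLastOccuranceIndex pr [] = -1 := by
        rw [findLastOccuranceIndex_eq_fold]
        exact foldA_absorb [] pr (-1) (by simp)
      simp [PySem.List.enumerate, this]
    · intro y; simp [PySem.Set.empty]
  | append_singleton t x ih =>
    obtain ⟨seen, hfold, hmem⟩ := ih
    rw [PySem.List.enumerate_append, List.foldl_append, hfold]
    simp only [PySem.List.enumerate, List.foldl_cons, List.foldl_nil]
    by_cases hcond : x ∈ pr ∧ x ∉ t
    · obtain ⟨hxpr, hxt⟩ := hcond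
      have hc1 : PySem.Set.contains (PySem.Set.ofList pr) x = true := by
        rw [contains_iff, mem_ofList']; exact hxpr
      have hc2 : PySem.Set.contains seen x = false := by
        rw [Bool.eq_false_iff]
        intro h
        exact hxt ((hmem x).mp (contains_iff.mp h)).1
      refine ⟨PySem.Set.add seen x, ?_, ?_⟩
      · have hA' : findLastOccuranceIndex pr (t ++ [x]) = (t.length : Int) := by
          rw [findLastOccuranceIndex_eq_fold]
          exact foldA_append_new t x hxt pr (-1) (by omega) hxpr
        unfold pvStepB
        rw [hc1, hc2]
        simp [hA']
      · intro y
        rw [PySem.Set.mem_add, hmem y]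
        constructor
        · rintro (⟨h1, h2⟩ | h)
          · exact ⟨List.mem_append_left _ h1, h2⟩
          · exact ⟨List.mem_append_right _ (h ▸ List.mem_singleton_self x), h ▸ hxpr⟩
        · rintro ⟨h1, h2⟩
          rcases List.mem_append.mp h1 with h | h
          · exact Or.inl ⟨h, h2⟩
          · exact Or.inr (List.mem_singleton.mp h)
    · have hA : findLastOccuranceIndex pr (t ++ [x]) = findLastOccuranceIndex pr t := by
        rw [findLastOccuranceIndex_eq_fold, findLastOccuranceIndex_eq_fold]
        apply foldA_append_old
        by_cases h : x ∈ t
        · exact Or.inl h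
        · exact Or.inr (fun hm => hcond ⟨hm, h⟩)
      refine ⟨seen, ?_, ?_⟩
      · unfold pvStepB
        rw [hA]
        by_cases hxpr : x ∈ pr
        · have hxt : x ∈ t := by
            by_contra h; exact hcond ⟨hxpr, h⟩
          have hc2 : PySem.Set.contains seen x = true :=
            contains_iff.mpr ((hmem x).mpr ⟨hxt, hxpr⟩)
          rw [hc2]; simp
        · have hc1 : PySem.Set.contains (PySem.Set.ofList pr) x = false := by
            rw [Bool.eq_false_iff]
            intro h
            exact hxpr (mem_ofList'.mp (contains_iff.mp h))
          rw [hc1]; simp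
      · intro y
        rw [hmem y]
        constructor
        · rintro ⟨h1, h2⟩; exact ⟨List.mem_append_left _ h1, h2⟩
        · rintro ⟨h1, h2⟩
          rcases List.mem_append.mp h1 with h | h
          · exact ⟨h, h2⟩
          · have : y = x := List.mem_singleton.mp h
            subst this
            have hyt : y ∈ t := by
              by_contra hne
              exact hcond ⟨h2, hne⟩
            exact ⟨hyt, h2⟩

-- ===== VERDICT (by name: the statement is the Claim_ definition above) =====
theorem findLastOccuranceIndex_spec : Claim_equal_findLastOccuranceIndex := by
  intro pr sq _
  unfold Spec_findLastOccuranceIndex findLastOccuranceIndex_alt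
  obtain ⟨seen, hfold, -⟩ := foldB_inv pr sq
  exact (congrArg Prod.fst hfold).symm
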